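-- pv_equiv track=rewrite | github.com/hukka-mail-ru/candy | engine/game.py | __getDistinctLetters__
-- ===== SOURCE A (Python) =====
-- import string
--
-- def __getDistinctLetters__(word: string) -> list:
--
--
--     distinct = {}
--     for w in word:
--         distinct[w] = 0
--
--     letters = []
--     for key in distinct:
--         letters.append(key)
--
--
--     return letters
-- ===== SOURCE B (Python) =====
-- import string
--
-- def __getDistinctLetters__(word: string) -> list:
--     # recursive: first letter, then recurse on the tail with that letter removed
--     if not word:
--         return []
--     head = word[0]
--     rest = [c for c in word[1:] if c != head]
--     return [head] + __getDistinctLetters__(rest)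
-- ===== Notes on version B (the rewrite author's own statement) =====
-- stated objective: alternative
-- what changed: Replaces the dict-build-then-extract-keys passes with a recursive head/remove-all-occurrences decomposition: take the first letter, filter every occurrence of it out of the tail, and recurse; no dict or seen-set is maintained.
import Mathlib
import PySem

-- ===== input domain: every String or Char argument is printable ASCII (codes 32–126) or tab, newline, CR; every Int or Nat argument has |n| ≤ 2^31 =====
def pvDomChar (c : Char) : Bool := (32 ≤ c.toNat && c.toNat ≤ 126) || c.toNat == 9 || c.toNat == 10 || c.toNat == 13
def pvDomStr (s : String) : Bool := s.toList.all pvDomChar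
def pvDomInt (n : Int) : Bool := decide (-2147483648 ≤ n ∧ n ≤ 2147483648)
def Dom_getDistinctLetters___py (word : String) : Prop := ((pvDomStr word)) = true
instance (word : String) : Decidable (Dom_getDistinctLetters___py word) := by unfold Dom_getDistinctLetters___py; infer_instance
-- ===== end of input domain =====

-- B replaces A's dict-build-then-extract-keys passes with a recursive decomposition:
-- take the first letter, remove all its occurrences from the tail, recurse (alternative; not faster).

-- ===== PORT A =====
def getDistinctLetters___py (word : String) : List String :=
  let distinct : PySem.Dict String Int :=
    word.toList.foldl (fun d w => d.insert (String.ofList [w]) 0) PySem.Dict.empty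
  let letters : List String :=
    distinct.keys.foldl (fun letters key => letters ++ [key]) []
  letters

-- ===== PORT B =====
-- Source B recurses on the tail with the head letter filtered out ('[c for c in word[1:] if c != head]');
-- this helper is that recursion on the code points.
def pvAltGo : List Char → List String
  | [] => []
  | c :: cs => String.ofList [c] :: pvAltGo (cs.filter (fun x => x != c))
termination_by l => l.length
decreasing_by
  simp only [List.length_unattach]
  exact Nat.lt_succ_of_le (le_trans (List.length_filter_le _ _) (le_of_eq List.length_attach))

def getDistinctLetters___py_alt (word : String) : List String :=
  pvAltGo word.toList

-- ===== PRECONDITION & SPEC =====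
def Spec_getDistinctLetters___py (word : String) (out : List String) : Prop := out = getDistinctLetters___py_alt word
instance (word : String) (out : List String) : Decidable (Spec_getDistinctLetters___py word out) := by unfold Spec_getDistinctLetters___py; infer_instance

-- ===== CLAIM (what is proved, stated in full; the proofs are below) =====
def Claim_equal_getDistinctLetters___py : Prop := ∀ (word : String), Dom_getDistinctLetters___py word → Spec_getDistinctLetters___py word (getDistinctLetters___py word)

-- ===== LEMMAS AND PROOFS =====

-- A's second loop just copies the keys list
theorem foldl_append_id (l acc : List String) :
    l.foldl (fun letters key => letters ++ [key]) acc = acc ++ l := by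
  induction l generalizing acc with
  | nil => simp
  | cons x xs ih => simp [List.foldl, ih]

-- updating a set with a list never changes when elements already present are dropped from the list
theorem update_filter_mem {α : Type} [BEq α] [LawfulBEq α]
    (cs : List α) (s : PySem.Set α) (c : α) (hc : c ∈ s) :
    PySem.Set.update s cs = PySem.Set.update s (cs.filter (fun x => x != c)) := by
  induction cs generalizing s with
  | nil => rfl
  | cons b cs ih =>
    by_cases hb : b = c
    · subst hb
      have hadd : PySem.Set.add s b = s := by
        simp [PySem.Set.add, PySem.Set.contains, hc]
      rw [List.filter_cons_of_neg (by simp)]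
      simp only [PySem.Set.update, List.foldl]
      rw [hadd]
      exact ih s hc
    · rw [List.filter_cons_of_pos (by simp [hb])]
      simp only [PySem.Set.update, List.foldl]
      have hc' : c ∈ PySem.Set.add s b := by
        simp [PySem.Set.add]; split <;> simp [hc]
      exact ih _ hc'

-- a head not occurring in the updating list can be pulled out of the accumulator
theorem update_cons_not_mem {α : Type} [BEq α] [LawfulBEq α]
    (cs : List α) (s : List α) (x : α) (hx : x ∉ cs) :
    PySem.Set.update (x :: s) cs = x :: PySem.Set.update s cs := by
  induction cs generalizing s with
  | nil => rfl
  | cons b cs ih =>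
    have hbx : b ≠ x := fun h => hx (h ▸ List.mem_cons_self ..)
    have hadd : PySem.Set.add (x :: s) b = x :: PySem.Set.add s b := by
      simp [PySem.Set.add, PySem.Set.contains, hbx]
      split <;> simp
    simp only [PySem.Set.update, List.foldl] at *
    rw [hadd]
    exact ih _ (fun h => hx (List.mem_cons_of_mem _ h))

-- the singleton-string key is injective on characters
theorem key_inj (a b : Char) (h : String.ofList [a] = String.ofList [b]) : a = b := by
  have := congrArg String.toList h
  simpa using this

-- core: A's ordered key set of singleton strings is B's recursion
theorem ofList_map_eq_pvAltGo_aux (n : Nat) :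
    ∀ l : List Char, l.length ≤ n →
      PySem.Set.ofList (l.map (fun w => String.ofList [w])) = pvAltGo l := by
  induction n with
  | zero =>
    intro l hl
    rw [List.length_eq_zero_iff.mp (Nat.le_zero.mp hl)]
    simp [pvAltGo, PySem.Set.ofList]
  | succ n ih =>
    intro l hl
    match l with
    | [] => simp [pvAltGo, PySem.Set.ofList]
    | c :: cs =>
      have h1 : PySem.Set.ofList ((c :: cs).map (fun w => String.ofList [w]))
          = PySem.Set.update [String.ofList [c]] (cs.map (fun w => String.ofList [w])) := rfl
      have h2 : (cs.map (fun w => String.ofList [w])).filter (fun y => y != String.ofList [c])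
          = (cs.filter (fun x => x != c)).map (fun w => String.ofList [w]) := by
        rw [List.filter_map]
        congr 1
        apply List.filter_congr
        intro x _
        by_cases hxc : x = c
        · simp [Function.comp, hxc]
        · have hk : String.ofList [x] ≠ String.ofList [c] := fun h => hxc (key_inj _ _ h)
          simp [Function.comp, bne, hxc, hk]
      have h3 : String.ofList [c] ∉ (cs.filter (fun x => x != c)).map (fun w => String.ofList [w]) := by
        intro hmem
        rcases List.mem_map.mp hmem with ⟨x, hx, hxe⟩
        have := key_inj _ _ hxe.symm
        subst this
        simpa using List.of_mem_filter hx
      have hlen : (cs.filter (fun x => x != c)).length ≤ n :=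
        le_trans (List.length_filter_le _ _) (Nat.le_of_succ_le_succ hl)
      rw [h1, update_filter_mem _ _ (String.ofList [c]) (List.mem_singleton.mpr rfl), h2,
        update_cons_not_mem _ _ _ h3]
      show String.ofList [c] :: PySem.Set.ofList _ = _
      rw [ih _ hlen]
      simp [pvAltGo]

theorem ofList_map_eq_pvAltGo (l : List Char) :
    PySem.Set.ofList (l.map (fun w => String.ofList [w])) = pvAltGo l :=
  ofList_map_eq_pvAltGo_aux l.length l le_rfl

-- ===== VERDICT (by name: the statement is the Claim_ definition above) =====
theorem getDistinctLetters___py_spec : Claim_equal_getDistinctLetters___py := by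
  intro word _
  unfold Spec_getDistinctLetters___py getDistinctLetters___py getDistinctLetters___py_alt
  simp only [foldl_append_id, List.nil_append,
    PySem.Dict.keys_foldl_insert_key (key := fun w => String.ofList [w])]
  rw [← ofList_map_eq_pvAltGo]
  rfl
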